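-- pv_equiv track=rewrite | github.com/lca-imcb/lca-ngs | struct_part.py | parse_struct
-- ===== SOURCE A (Python) =====
-- import itertools
-- from collections import defaultdict
--
-- def parse_struct(struct_str, partitions):
--
--     charpos = defaultdict(list)
--
--     # initial collection (0-based)
--     for i, s in enumerate(struct_str):
--         charpos[s].append(i)
--
--     assert set(charpos.keys()) == set(''.join(partitions)), \
--             'Unexpected error while defining partitions'
--
--     # combine partitions
--     struct_dict = dict()
--     for partition in partitions:
--         struct_dict[partition] = list()
--         for character in partition:
--             struct_dict[partition].extend(charpos[character])
--
--     # convert to ranges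
--     def ranges(i):
--         # https://stackoverflow.com/questions/4628333/
--         # converting-a-list-of-integers-into-range-in-python
--         for a, b in itertools.groupby(enumerate(i),
--                                       lambda pair: pair[1] - pair[0]):
--             b = list(b)
--             yield b[0][1], b[-1][1]
--
--     struct_ranges = dict()
--     for partition in partitions:
--         positions = sorted(struct_dict[partition])
--         struct_ranges[partition] = list(ranges(positions))
--
--     return struct_ranges
-- ===== SOURCE B (Python) =====
-- def parse_struct(struct_str, partitions):
--     assert set(struct_str) == set(''.join(partitions)), \
--             'Unexpected error while defining partitions'
--
--     # each char -> partitions containing it (once per occurrence), distinct partitions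
--     char_parts = {}
--     for p in dict.fromkeys(partitions):
--         for c in p:
--             char_parts.setdefault(c, []).append(p)
--
--     struct_ranges = {p: [] for p in partitions}
--     # single forward pass: ranges are built already sorted, no sort/groupby needed
--     for i, c in enumerate(struct_str):
--         for p in char_parts.get(c, []):
--             rs = struct_ranges[p]
--             if rs and rs[-1][1] == i - 1:
--                 rs[-1] = (rs[-1][0], i)
--             else:
--                 rs.append((i, i))
--     return struct_ranges
-- ===== Notes on version B (the rewrite author's own statement) =====
-- stated objective: alternative
-- what changed: Replaces the per-partition position-collecting dict, sorted() and itertools.groupby with a char-to-partitions index and a single forward scan over the string that extends or opens each partition's last range in place.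
import Mathlib
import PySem

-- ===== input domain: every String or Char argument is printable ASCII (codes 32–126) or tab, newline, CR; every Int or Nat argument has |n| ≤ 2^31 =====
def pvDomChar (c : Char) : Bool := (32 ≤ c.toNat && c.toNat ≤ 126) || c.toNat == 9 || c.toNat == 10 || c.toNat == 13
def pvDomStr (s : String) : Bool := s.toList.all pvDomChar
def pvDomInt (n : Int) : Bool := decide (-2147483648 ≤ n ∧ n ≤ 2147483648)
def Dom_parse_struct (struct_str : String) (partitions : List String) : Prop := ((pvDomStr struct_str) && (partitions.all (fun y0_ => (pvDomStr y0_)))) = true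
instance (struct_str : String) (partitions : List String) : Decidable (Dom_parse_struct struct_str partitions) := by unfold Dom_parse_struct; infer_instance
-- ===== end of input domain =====

-- B replaces A's per-partition collect + sorted() + itertools.groupby with a char->partitions
-- index and one forward scan that extends/opens each partition's last range (alternative decomposition).


-- ===== PORT A =====
-- hand port of A's generator `ranges`: itertools.groupby(enumerate(i), key = pair[1] - pair[0]),
-- yielding (first value, last value) of each group; exact for int lists
def pvA_rangesAux : List (Int × Int) → Int → Int → Int → List (Int × Int)
  | [], _, first, last => [(first, last)]
  | (j, v) :: rest, key, first, last =>
    if v - j = key then pvA_rangesAux rest key first v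
    else (first, last) :: pvA_rangesAux rest (v - j) v v

def pvA_ranges (positions : List Int) : List (Int × Int) :=
  match PySem.List.enumerate positions with
  | [] => []
  | (j, v) :: rest => pvA_rangesAux rest (v - j) v v

def parse_struct (struct_str : String) (partitions : List String) : List (String × List (Int × Int)) :=
  -- charpos = defaultdict(list); for i, s in enumerate(struct_str): charpos[s].append(i)
  let charpos : PySem.Dict Char (List Int) :=
    (PySem.List.enumerate struct_str.toList).foldl
      (fun d p => d.modify p.2 [] (· ++ [p.1])) PySem.Dict.empty
  -- the assert raises exactly outside Pre_parse_struct; under Pre_ it is a no-op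
  let struct_dict : PySem.Dict String (List Int) :=
    partitions.foldl
      (fun d partition =>
        partition.toList.foldl
          (fun d character => d.insert partition (d.getD partition [] ++ charpos.getD character []))
          (d.insert partition []))
      PySem.Dict.empty
  let struct_ranges : PySem.Dict String (List (Int × Int)) :=
    partitions.foldl
      (fun d partition =>
        d.insert partition
          (pvA_ranges (PySem.List.sorted (struct_dict.getD partition []) (fun x => x) false)))
      PySem.Dict.empty
  struct_ranges.items

-- ===== PORT B =====
-- rs[-1] = (rs[-1][0], i) / rs.append((i, i)) of Source B
def pvB_add (rs : List (Int × Int)) (i : Int) : List (Int × Int) :=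
  match rs.getLast? with
  | some (a, b) => if b = i - 1 then rs.dropLast ++ [(a, i)] else rs ++ [(i, i)]
  | none => [(i, i)]

def parse_struct_alt (struct_str : String) (partitions : List String) : List (String × List (Int × Int)) :=
  -- the assert raises exactly outside Pre_parse_struct; under Pre_ it is a no-op
  -- char_parts: for p in dict.fromkeys(partitions): for c in p: char_parts.setdefault(c, []).append(p)
  let char_parts : PySem.Dict Char (List String) :=
    (PySem.List.dedup partitions).foldl
      (fun d p => p.toList.foldl (fun d c => d.modify c [] (· ++ [p])) d)
      PySem.Dict.empty
  -- struct_ranges = {p: [] for p in partitions}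
  let init : PySem.Dict String (List (Int × Int)) :=
    partitions.foldl (fun d p => d.insert p []) PySem.Dict.empty
  -- single forward scan
  let final : PySem.Dict String (List (Int × Int)) :=
    (PySem.List.enumerate struct_str.toList).foldl
      (fun d q =>
        (char_parts.getD q.2 []).foldl
          (fun d p => d.insert p (pvB_add (d.getD p []) q.1)) d)
      init
  final.items

-- ===== PRECONDITION & SPEC =====
-- Pre_ excludes exactly the inputs on which A's assert fails (AssertionError): the set of
-- characters of struct_str must equal the set of characters of ''.join(partitions).
def Pre_parse_struct (struct_str : String) (partitions : List String) : Prop :=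
  (struct_str.toList.all (fun c => (partitions.flatMap String.toList).contains c)
    && (partitions.flatMap String.toList).all (fun c => struct_str.toList.contains c)) = true
instance (struct_str : String) (partitions : List String) : Decidable (Pre_parse_struct struct_str partitions) := by unfold Pre_parse_struct; infer_instance

def pvWitness_parse_struct : String × List String := ("aabcc", ["ab", "c"])

def Spec_parse_struct (struct_str : String) (partitions : List String) (out : List (String × List (Int × Int))) : Prop := out = parse_struct_alt struct_str partitions
instance (struct_str : String) (partitions : List String) (out : List (String × List (Int × Int))) : Decidable (Spec_parse_struct struct_str partitions out) := by unfold Spec_parse_struct; infer_instance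

-- ===== CLAIM (what is proved, stated in full; the proofs are below) =====
def Claim_equal_parse_struct : Prop := ∀ (struct_str : String) (partitions : List String), Dom_parse_struct struct_str partitions → Pre_parse_struct struct_str partitions → Spec_parse_struct struct_str partitions (parse_struct struct_str partitions)

-- ===== LEMMAS AND PROOFS =====

def pvPosFrom (c : Char) (j : Int) : List Char → List Int
  | [] => []
  | x :: t => if x == c then j :: pvPosFrom c (j + 1) t else pvPosFrom c (j + 1) t

def pvSeqFrom (p : List Char) (j : Int) : List Char → List Int
  | [] => []
  | x :: t => List.replicate (p.count x) j ++ pvSeqFrom p (j + 1) t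

-- L1+L2: charpos lookup
theorem pv_charpos_getD (s : List Char) (j : Int) (d : PySem.Dict Char (List Int)) (c : Char) :
    ((PySem.List.enumerate s j).foldl (fun d p => d.modify p.2 [] (· ++ [p.1])) d).getD c []
      = d.getD c [] ++ pvPosFrom c j s := by
  induction s generalizing j d with
  | nil => simp [PySem.List.enumerate_nil, pvPosFrom]
  | cons x t ih =>
    rw [PySem.List.enumerate_cons]
    simp only [List.foldl_cons]
    rw [ih]
    by_cases h : x = c
    · subst h
      simp [pvPosFrom, PySem.Dict.getD_modify_self]
    · simp [pvPosFrom, h, PySem.Dict.getD_modify_of_ne _ _ _ (Ne.symm h)]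

-- L3: inner struct_dict loop
theorem pv_inner_extend (cs : List Char) (d : PySem.Dict String (List Int)) (p : String)
    (v : List Int) (g : Char → List Int) :
    cs.foldl (fun d c => d.insert p (d.getD p [] ++ g c)) (d.insert p v)
      = d.insert p (v ++ cs.flatMap g) := by
  induction cs generalizing v with
  | nil => simp
  | cons c t ih =>
    simp only [List.foldl_cons, List.flatMap_cons]
    rw [PySem.Dict.getD_insert_self, PySem.Dict.insert_insert_self, ih, List.append_assoc]

-- L4: getD unchanged by insert-fold at absent key
theorem pv_getD_foldl_insert_not_mem {ν : Type} (l : List String) (f : String → ν)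
    (d : PySem.Dict String ν) (p : String) (x : ν) (h : p ∉ l) :
    (l.foldl (fun d q => d.insert q (f q)) d).getD p x = d.getD p x := by
  induction l generalizing d with
  | nil => rfl
  | cons q t ih =>
    simp only [List.foldl_cons]
    simp only [List.mem_cons, not_or] at h
    rw [ih _ h.2, PySem.Dict.getD_insert_of_ne _ _ _ h.1]

-- L5: getD of insert-fold at a member key
theorem pv_getD_foldl_insert_mem {ν : Type} (l : List String) (f : String → ν)
    (d : PySem.Dict String ν) (p : String) (x : ν) (h : p ∈ l) :
    (l.foldl (fun d q => d.insert q (f q)) d).getD p x = f p := by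
  induction l generalizing d with
  | nil => cases h
  | cons q t ih =>
    simp only [List.foldl_cons]
    by_cases ht : p ∈ t
    · exact ih _ ht
    · have hq : p = q := by rcases List.mem_cons.1 h with h' | h' <;> [exact h'; exact absurd h' ht]
      subst hq
      rw [pv_getD_foldl_insert_not_mem _ _ _ _ _ ht, PySem.Dict.getD_insert_self]

-- L6: A's groupby over enumerate equals the fold with pvB_add
theorem pv_rangesAux_foldl (t : List Int) (j first last : Int) (acc : List (Int × Int)) :
    acc ++ pvA_rangesAux (PySem.List.enumerate t j) (last - (j - 1)) first last
      = t.foldl pvB_add (acc ++ [(first, last)]) := by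
  induction t generalizing j first last acc with
  | nil => simp [PySem.List.enumerate_nil, pvA_rangesAux]
  | cons v r ih =>
    rw [PySem.List.enumerate_cons]
    simp only [pvA_rangesAux, List.foldl_cons]
    by_cases h : v - j = last - (j - 1)
    · have hv : v = last + 1 := by omega
      rw [if_pos h]
      have hkey : last - (j - 1) = v - ((j + 1) - 1) := by omega
      rw [hkey, ih]
      have : pvB_add (acc ++ [(first, last)]) v = acc ++ [(first, v)] := by
        simp [pvB_add]
        omega
      rw [this]
    · rw [if_neg h]
      have hkey : v - j = v - ((j + 1) - 1) := by omega
      have : acc ++ ((first, last) :: pvA_rangesAux (PySem.List.enumerate r (j + 1)) (v - j) v v)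
          = (acc ++ [(first, last)]) ++ pvA_rangesAux (PySem.List.enumerate r (j + 1)) (v - ((j + 1) - 1)) v v := by
        rw [← hkey]; simp
      rw [this, ih]
      have : pvB_add (acc ++ [(first, last)]) v = (acc ++ [(first, last)]) ++ [(v, v)] := by
        simp [pvB_add]
        omega
      rw [this]

-- L7
theorem pv_ranges_eq_foldl (l : List Int) : pvA_ranges l = l.foldl pvB_add [] := by
  cases l with
  | nil => rfl
  | cons v r =>
    have h0 : (0 : Int) + 1 = 1 := by norm_num
    rw [pvA_ranges, PySem.List.enumerate_cons]
    simp only [List.foldl_cons]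
    have : pvB_add [] v = [(v, v)] := rfl
    rw [this]
    have := pv_rangesAux_foldl r 1 v v []
    simpa using this

-- L8b: every element of pvSeqFrom p j s is ≥ j
theorem pv_seqFrom_ge (p : List Char) (s : List Char) (j : Int) :
    ∀ x ∈ pvSeqFrom p j s, j ≤ x := by
  induction s generalizing j with
  | nil => simp [pvSeqFrom]
  | cons y t ih =>
    intro x hx
    simp only [pvSeqFrom, List.mem_append] at hx
    rcases hx with hx | hx
    · simp [List.eq_of_mem_replicate hx]
    · have := ih (j + 1) x hx; omega

-- L8a: pvSeqFrom is nondecreasing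
theorem pv_seqFrom_pairwise (p : List Char) (s : List Char) (j : Int) :
    (pvSeqFrom p j s).Pairwise (· ≤ ·) := by
  induction s generalizing j with
  | nil => simp [pvSeqFrom]
  | cons y t ih =>
    simp only [pvSeqFrom]
    rw [List.pairwise_append]
    refine ⟨List.pairwise_replicate.2 (by simp), ih (j + 1), ?_⟩
    intro a ha b hb
    have h1 := List.eq_of_mem_replicate ha
    have h2 := pv_seqFrom_ge p t (j + 1) b hb
    omega

-- L8e: flatMap of singleton-if equals replicate count
theorem pv_flatMap_if_eq_replicate (P : List Char) (x : Char) (j : Int) :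
    (P.flatMap (fun c => if x == c then [j] else [])) = List.replicate (P.count x) j := by
  induction P with
  | nil => simp
  | cons c t ih =>
    simp only [List.flatMap_cons, List.count_cons, ih]
    by_cases h : x = c
    · subst h; simp [List.replicate_succ]
    · have h' : ¬ c = x := fun hh => h hh.symm
      simp [h, h']

-- L8d: flatMap of pointwise append, up to permutation
theorem pv_flatMap_append_perm {α β : Type} (P : List α) (f g : α → List β) :
    (P.flatMap (fun c => f c ++ g c)).Perm (P.flatMap f ++ P.flatMap g) := by
  induction P with
  | nil => simp
  | cons c t ih =>
    simp only [List.flatMap_cons, List.append_assoc]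
    refine List.Perm.append_left (f c) ?_
    refine (List.Perm.append_left (g c) ih).trans ?_
    exact List.perm_append_comm_assoc _ _ _

-- L8c: B's in-order position multiset is a permutation of A's per-char concatenation
theorem pv_seqFrom_perm_flatMap (p : List Char) (s : List Char) (j : Int) :
    (pvSeqFrom p j s).Perm (p.flatMap (fun c => pvPosFrom c j s)) := by
  induction s generalizing j with
  | nil => simp [pvSeqFrom, pvPosFrom]
  | cons x t ih =>
    have hpos : ∀ c, pvPosFrom c j (x :: t)
        = (if x == c then [j] else []) ++ pvPosFrom c (j + 1) t := by
      intro c; by_cases h : x = c <;> simp [pvPosFrom, h]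
    simp only [pvSeqFrom]
    have h1 : (p.flatMap (fun c => pvPosFrom c j (x :: t))).Perm
        (p.flatMap (fun c => if x == c then [j] else []) ++ p.flatMap (fun c => pvPosFrom c (j + 1) t)) := by
      have := pv_flatMap_append_perm p (fun c => if x == c then [j] else []) (fun c => pvPosFrom c (j + 1) t)
      have heq : (p.flatMap (fun c => pvPosFrom c j (x :: t)))
          = p.flatMap (fun c => (if x == c then [j] else []) ++ pvPosFrom c (j + 1) t) := by
        exact List.flatMap_congr (fun c _ => hpos c)
      rw [heq]; exact this
    refine List.Perm.symm (h1.trans ?_)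
    rw [pv_flatMap_if_eq_replicate]
    exact List.Perm.symm ((ih (j + 1)).append_left _)

-- L8: A's sorted positions list IS B's in-order sequence
theorem pv_sorted_eq_seqFrom (p : List Char) (s : List Char) :
    PySem.List.sorted (p.flatMap (fun c => pvPosFrom c 0 s)) (fun x => x) false
      = pvSeqFrom p 0 s := by
  exact PySem.List.sorted_id_eq_of_perm_of_pairwise _ _
    (pv_seqFrom_perm_flatMap p s 0) (pv_seqFrom_pairwise p s 0)

-- L9: char_parts lookup: each partition once per occurrence of c in it
theorem pv_char_parts_getD (P : List String) (c : Char) :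
    ((PySem.List.dedup P).foldl
        (fun d p => p.toList.foldl (fun d ch => d.modify ch [] (· ++ [p])) d)
        PySem.Dict.empty).getD c []
      = (PySem.List.dedup P).flatMap (fun p => List.replicate (p.toList.count c) p) := by
  have hstep : ∀ (d : PySem.Dict Char (List String)) (p : String),
      p.toList.foldl (fun d ch => d.modify ch [] (· ++ [p])) d
        = (p.toList.map (fun ch => (ch, p))).foldl (fun d q => d.modify q.1 [] (· ++ [q.2])) d := by
    intro d p; rw [List.foldl_map]
  have hfold : ∀ (L : List String) (d : PySem.Dict Char (List String)),
      L.foldl (fun d p => p.toList.foldl (fun d ch => d.modify ch [] (· ++ [p])) d) d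
        = (L.flatMap (fun p => p.toList.map (fun ch => (ch, p)))).foldl
            (fun d q => d.modify q.1 [] (· ++ [q.2])) d := by
    intro L
    induction L with
    | nil => intro d; simp
    | cons p t ih =>
      intro d
      rw [List.foldl_cons, ih, hstep, List.flatMap_cons, List.foldl_append]
  rw [hfold, PySem.Dict.getD_foldl_modify_append]
  simp only [PySem.Dict.getD_empty, List.nil_append, List.filter_flatMap, List.map_flatMap]
  refine List.flatMap_congr (fun p _ => ?_)
  rw [List.filter_map]
  have : ((fun q : Char × String => q.1 == c) ∘ fun ch => (ch, p)) = (fun ch => ch == c) := rfl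
  rw [this, List.filter_beq]
  simp

-- L10: multiplicity of p in the char->partitions index
theorem pv_count_flatMap_replicate (P : List String) (m : String → Nat) (p : String)
    (hnd : P.Nodup) (hp : p ∈ P) :
    (P.flatMap (fun q => List.replicate (m q) q)).count p = m p := by
  induction P with
  | nil => cases hp
  | cons q t ih =>
    simp only [List.flatMap_cons, List.count_append]
    rcases List.mem_cons.1 hp with h | h
    · subst h
      have hnot : p ∉ t := (List.nodup_cons.1 hnd).1
      have : (t.flatMap (fun q => List.replicate (m q) q)).count p = 0 := by
        rw [List.count_eq_zero]
        intro hmem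
        rcases List.mem_flatMap.1 hmem with ⟨q, hq, hin⟩
        exact hnot (List.eq_of_mem_replicate hin ▸ hq)
      simp [this]
    · have hne : q ≠ p := by
        rintro rfl; exact (List.nodup_cons.1 hnd).1 h
      rw [ih (List.nodup_cons.1 hnd).2 h]
      simp [List.count_replicate, hne]

-- L11: effect on key p of one position's inner insert loop
theorem pv_inner_scan_getD (L : List String) (d : PySem.Dict String (List (Int × Int)))
    (i : Int) (p : String) :
    ((L.foldl (fun d q => d.insert q (pvB_add (d.getD q []) i)) d).getD p [])
      = (List.replicate (L.count p) i).foldl pvB_add (d.getD p []) := by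
  induction L generalizing d with
  | nil => rfl
  | cons q t ih =>
    simp only [List.foldl_cons, List.count_cons]
    by_cases h : q = p
    · subst h
      rw [ih]
      simp [PySem.Dict.getD_insert_self, List.replicate_succ]
    · rw [ih, PySem.Dict.getD_insert_of_ne _ _ _ (fun hh => h hh.symm)]
      simp [h]

-- L12: B's forward scan, observed at one partition key
theorem pv_scan_getD (cp : PySem.Dict Char (List String)) (l : List Char) (j : Int)
    (d : PySem.Dict String (List (Int × Int))) (p : String)
    (hc : ∀ x : Char, (cp.getD x []).count p = p.toList.count x) :
    (((PySem.List.enumerate l j).foldl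
        (fun d q => (cp.getD q.2 []).foldl (fun d r => d.insert r (pvB_add (d.getD r []) q.1)) d) d).getD p [])
      = (pvSeqFrom p.toList j l).foldl pvB_add (d.getD p []) := by
  induction l generalizing j d with
  | nil => simp [PySem.List.enumerate_nil, pvSeqFrom]
  | cons x t ih =>
    rw [PySem.List.enumerate_cons]
    simp only [List.foldl_cons, pvSeqFrom]
    rw [ih, pv_inner_scan_getD, hc, List.foldl_append]

-- L13: the initial dict {p: [] for p in partitions} answers [] everywhere
theorem pv_init_getD (P : List String) (p : String) :
    ((P.foldl (fun d q => d.insert q ([] : List (Int × Int))) PySem.Dict.empty).getD p []) = [] := by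
  by_cases h : p ∈ P
  · exact pv_getD_foldl_insert_mem P (fun _ => []) _ p [] h
  · rw [pv_getD_foldl_insert_not_mem P (fun _ => []) _ p [] h, PySem.Dict.getD_empty]

-- Set.update by elements already present is the identity
theorem pv_update_of_subset (l : List String) (s : PySem.Set String)
    (h : ∀ x ∈ l, x ∈ s) : PySem.Set.update s l = s := by
  induction l generalizing s with
  | nil => rfl
  | cons x t ih =>
    have hx : PySem.Set.add s x = s := by
      simp [PySem.Set.add, PySem.Set.contains, h x (by simp)]
    simp only [PySem.Set.update, List.foldl_cons] at *
    rw [hx, ih _ (fun y hy => h y (by simp [hy]))]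

-- L14b: the scan never adds a key
theorem pv_scan_keys (cp : PySem.Dict Char (List String)) (l : List Char) (j : Int)
    (d : PySem.Dict String (List (Int × Int)))
    (hk : ∀ x : Char, ∀ q ∈ cp.getD x [], q ∈ d.keys) :
    ((PySem.List.enumerate l j).foldl
        (fun d q => (cp.getD q.2 []).foldl (fun d r => d.insert r (pvB_add (d.getD r []) q.1)) d) d).keys
      = d.keys := by
  induction l generalizing j d with
  | nil => simp [PySem.List.enumerate_nil]
  | cons x t ih =>
    rw [PySem.List.enumerate_cons]
    simp only [List.foldl_cons]
    have hinner : ((cp.getD x []).foldl (fun d r => d.insert r (pvB_add (d.getD r []) j)) d).keys = d.keys := by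
      rw [PySem.Dict.keys_foldl_insert, pv_update_of_subset _ _ (hk x)]
    rw [ih _ _ (fun y q hq => by rw [hinner]; exact hk y q hq), hinner]

theorem pvA_char (s : String) (P : List String) :
    parse_struct s P
      = (PySem.Set.ofList P).map (fun p => (p, (pvSeqFrom p.toList 0 s.toList).foldl pvB_add [])) := by
  simp only [parse_struct]
  set cpos : PySem.Dict Char (List Int) :=
    (PySem.List.enumerate s.toList).foldl (fun d p => d.modify p.2 [] (· ++ [p.1])) PySem.Dict.empty
    with hcposdef
  set SD : PySem.Dict String (List Int) :=
    P.foldl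
      (fun d partition =>
        partition.toList.foldl
          (fun d character => d.insert partition (d.getD partition [] ++ cpos.getD character []))
          (d.insert partition []))
      PySem.Dict.empty
    with hSDdef
  have hcp : ∀ c : Char, cpos.getD c [] = pvPosFrom c 0 s.toList := by
    intro c
    rw [hcposdef, pv_charpos_getD]
    simp
  have hsd : ∀ p ∈ P, SD.getD p [] = p.toList.flatMap (fun c => pvPosFrom c 0 s.toList) := by
    intro p hp
    rw [hSDdef,
      PySem.List.foldl_congr_mem P _
        (fun d q => d.insert q (q.toList.flatMap (fun c => cpos.getD c [])))
        PySem.Dict.empty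
        (fun d q _ => by rw [pv_inner_extend]; simp),
      pv_getD_foldl_insert_mem _ _ _ _ _ hp]
    exact List.flatMap_congr (fun c _ => hcp c)
  set DA : PySem.Dict String (List (Int × Int)) :=
    P.foldl
      (fun d partition =>
        d.insert partition (pvA_ranges (PySem.List.sorted (SD.getD partition []) (fun x => x) false)))
      PySem.Dict.empty
    with hDAdef
  have hnd : DA.keys.Nodup := by
    rw [hDAdef]
    exact PySem.Dict.nodup_keys_foldl_insert _ _ _ PySem.Dict.nodup_keys_empty
  have hkeys : DA.keys = PySem.Set.ofList P := by
    rw [hDAdef, PySem.Dict.keys_foldl_insert, PySem.Dict.keys_empty]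
    rfl
  rw [PySem.Dict.items_eq_map_keys DA hnd [], hkeys]
  refine List.map_congr_left (fun p hp => ?_)
  have hpP : p ∈ P := (PySem.Set.mem_ofList P p).1 hp
  have hval : DA.getD p [] = pvA_ranges (PySem.List.sorted (SD.getD p []) (fun x => x) false) := by
    rw [hDAdef]
    exact pv_getD_foldl_insert_mem P _ _ p [] hpP
  rw [hval, hsd p hpP, pv_sorted_eq_seqFrom, pv_ranges_eq_foldl]

theorem pvB_char (s : String) (P : List String) :
    parse_struct_alt s P
      = (PySem.Set.ofList P).map (fun p => (p, (pvSeqFrom p.toList 0 s.toList).foldl pvB_add [])) := by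
  simp only [parse_struct_alt]
  set cp : PySem.Dict Char (List String) :=
    (PySem.List.dedup P).foldl
      (fun d p => p.toList.foldl (fun d c => d.modify c [] (· ++ [p])) d)
      PySem.Dict.empty
    with hcpdef
  set INIT : PySem.Dict String (List (Int × Int)) :=
    P.foldl (fun d p => d.insert p []) PySem.Dict.empty with hINITdef
  set DB : PySem.Dict String (List (Int × Int)) :=
    (PySem.List.enumerate s.toList).foldl
      (fun d q =>
        (cp.getD q.2 []).foldl (fun d p => d.insert p (pvB_add (d.getD p []) q.1)) d)
      INIT
    with hDBdef
  have hcpc : ∀ c : Char,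
      cp.getD c [] = (PySem.List.dedup P).flatMap (fun p => List.replicate (p.toList.count c) p) := by
    intro c; rw [hcpdef]; exact pv_char_parts_getD P c
  have hinitkeys : INIT.keys = PySem.Set.ofList P := by
    rw [hINITdef, PySem.Dict.keys_foldl_insert, PySem.Dict.keys_empty]; rfl
  have hk : ∀ x : Char, ∀ q ∈ cp.getD x [], q ∈ INIT.keys := by
    intro x q hq
    rw [hcpc x] at hq
    rcases List.mem_flatMap.1 hq with ⟨r, hr, hin⟩
    have : q = r := List.eq_of_mem_replicate hin
    subst this
    rw [hinitkeys]
    exact (PySem.Set.mem_ofList P q).2 ((PySem.List.mem_dedup P q).1 hr)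
  have hkeys : DB.keys = INIT.keys := by
    rw [hDBdef]; exact pv_scan_keys cp s.toList 0 INIT hk
  have hnd : DB.keys.Nodup := by
    rw [hkeys, hINITdef]
    exact PySem.Dict.nodup_keys_foldl_insert _ _ _ PySem.Dict.nodup_keys_empty
  rw [PySem.Dict.items_eq_map_keys DB hnd [], hkeys, hinitkeys]
  refine List.map_congr_left (fun p hp => ?_)
  have hpP : p ∈ P := (PySem.Set.mem_ofList P p).1 hp
  have hc : ∀ x : Char, (cp.getD x []).count p = p.toList.count x := by
    intro x
    rw [hcpc x]
    exact pv_count_flatMap_replicate _ _ p (PySem.List.nodup_dedup P)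
      ((PySem.List.mem_dedup P p).2 hpP)
  rw [hDBdef, pv_scan_getD cp s.toList 0 INIT p hc, hINITdef, pv_init_getD]

theorem pv_main (s : String) (P : List String) : parse_struct s P = parse_struct_alt s P := by
  rw [pvA_char, pvB_char]

-- ===== VERDICT (by name: the statement is the Claim_ definition above) =====
theorem parse_struct_spec : Claim_equal_parse_struct := by
  intro s P _ _
  unfold Spec_parse_struct
  exact pv_main s P
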